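-- pv_equiv track=rewrite | github.com/saloni07006/PharmaGx-backend | backend/services/genotype_service.py | build_diplotypes
-- ===== SOURCE A (Python) =====
-- from collections import defaultdict
--
-- def build_diplotypes(variants):
--     """
--     Group star alleles by gene and create diplotypes.
--     """
--
--     gene_map = defaultdict(list)
--
--     for var in variants:
--         gene_map[var["gene"]].append(var["star"])
--
--     diplotypes = {}
--
--     for gene, stars in gene_map.items():
--         if len(stars) >= 2:
--             diplotype = f"{stars[0]}/{stars[1]}"
--         elif len(stars) == 1:
--             diplotype = f"{stars[0]}/Unknown"
--         else:
--             diplotype = "Unknown"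
--
--         diplotypes[gene] = diplotype
--
--     return diplotypes
-- ===== SOURCE B (Python) =====
-- def build_diplotypes(variants):
--     """
--     Group star alleles by gene and create diplotypes, in one pass.
--     """
--     result = {}
--     pending = {}
--     for var in variants:
--         gene = var["gene"]
--         star = var["star"]
--         if gene not in result:
--             result[gene] = f"{star}/Unknown"
--             pending[gene] = star
--         elif gene in pending:
--             result[gene] = f"{pending.pop(gene)}/{star}"
--     return result
-- ===== Notes on version B (the rewrite author's own statement) =====
-- stated objective: alternative
-- what changed: Replaces A's two-phase grouping (defaultdict of per-gene star lists, then a formatting pass over the groups) with a single pass that maintains the diplotype dict directly plus a pending dict of first stars: first occurrence writes 'star/Unknown', second overwrites with 'first/second', later ones are ignored.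
import Mathlib
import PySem

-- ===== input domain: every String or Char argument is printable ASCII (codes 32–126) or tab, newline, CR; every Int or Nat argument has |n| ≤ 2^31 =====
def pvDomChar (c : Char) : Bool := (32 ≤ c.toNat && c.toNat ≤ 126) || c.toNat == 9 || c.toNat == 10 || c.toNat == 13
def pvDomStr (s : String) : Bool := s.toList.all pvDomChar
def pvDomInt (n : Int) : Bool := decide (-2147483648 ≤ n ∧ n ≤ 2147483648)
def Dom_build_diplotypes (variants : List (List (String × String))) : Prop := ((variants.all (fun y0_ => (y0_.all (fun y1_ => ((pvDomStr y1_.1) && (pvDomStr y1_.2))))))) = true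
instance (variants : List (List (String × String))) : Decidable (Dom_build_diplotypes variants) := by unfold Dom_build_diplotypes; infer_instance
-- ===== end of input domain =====

-- B fuses A's two loops (group-then-format) into a single pass that keeps the
-- formatted diplotype dict directly, with a 'pending' dict of first stars;
-- objective: simpler/alternative decomposition, same first-occurrence key order.

-- ===== PORT A =====
-- var["k"] on a dict: first-match lookup; total form with default "" — exact under Pre_ (key present)
def pvLookup (v : List (String × String)) (k : String) : String :=
  ((PySem.Dict.mk v).get? k).getD ""

-- first loop body: gene_map[var["gene"]].append(var["star"]) on a defaultdict(list)
def pvGroupStep (d : PySem.Dict String (List String)) (var : List (String × String)) :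
    PySem.Dict String (List String) :=
  d.modify (pvLookup var "gene") [] (fun stars => stars ++ [pvLookup var "star"])

-- second loop body: diplotypes[gene] = diplotype (the if/elif/else chain)
def pvFmtStep (d : PySem.Dict String String) (gs : String × List String) :
    PySem.Dict String String :=
  d.insert gs.1
    (if 2 ≤ gs.2.length then
       PySem.List.pyGetD gs.2 0 "" ++ "/" ++ PySem.List.pyGetD gs.2 1 ""
     else if gs.2.length = 1 then
       PySem.List.pyGetD gs.2 0 "" ++ "/Unknown"
     else "Unknown")

def build_diplotypes (variants : List (List (String × String))) : List (String × String) :=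
  let gene_map := variants.foldl pvGroupStep PySem.Dict.empty
  let diplotypes := gene_map.items.foldl pvFmtStep PySem.Dict.empty
  diplotypes.items

-- ===== PORT B =====
-- single-pass body: state = (result, pending-first-star)
def pvAltStep (st : PySem.Dict String String × PySem.Dict String String)
    (var : List (String × String)) :
    PySem.Dict String String × PySem.Dict String String :=
  let g := pvLookup var "gene"
  let s := pvLookup var "star"
  if st.1.contains g = false then
    (st.1.insert g (s ++ "/Unknown"), st.2.insert g s)
  else if st.2.contains g then
    (st.1.insert g (st.2.getD g "" ++ "/" ++ s), st.2.erase g)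
  else
    st

def build_diplotypes_alt (variants : List (List (String × String))) : List (String × String) :=
  (variants.foldl pvAltStep (PySem.Dict.empty, PySem.Dict.empty)).1.items

-- ===== PRECONDITION & SPEC =====
-- Pre_ excludes exactly the inputs where Python A raises KeyError: some variant lacks key "gene" or "star".
def Pre_build_diplotypes (variants : List (List (String × String))) : Prop :=
  (variants.all (fun v => (PySem.Dict.mk v).contains "gene" && (PySem.Dict.mk v).contains "star")) = true
instance (variants : List (List (String × String))) : Decidable (Pre_build_diplotypes variants) := by
  unfold Pre_build_diplotypes; infer_instance

def pvWitness_build_diplotypes : (List (List (String × String))) :=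
  [[("gene", "CYP2D6"), ("star", "*1")], [("gene", "CYP2D6"), ("star", "*4")]]

def Spec_build_diplotypes (variants : List (List (String × String))) (out : List (String × String)) : Prop := out = build_diplotypes_alt variants
instance (variants : List (List (String × String))) (out : List (String × String)) : Decidable (Spec_build_diplotypes variants out) := by unfold Spec_build_diplotypes; infer_instance

-- ===== CLAIM (what is proved, stated in full; the proofs are below) =====
def Claim_equal_build_diplotypes : Prop := ∀ (variants : List (List (String × String))), Dom_build_diplotypes variants → Pre_build_diplotypes variants → Spec_build_diplotypes variants (build_diplotypes variants)

-- ===== LEMMAS AND PROOFS =====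

-- the per-item formatting A's second loop applies (value part of pvFmtStep)
def pvFmtV (stars : List String) : String :=
  if 2 ≤ stars.length then
    PySem.List.pyGetD stars 0 "" ++ "/" ++ PySem.List.pyGetD stars 1 ""
  else if stars.length = 1 then
    PySem.List.pyGetD stars 0 "" ++ "/Unknown"
  else "Unknown"

def pvFmtP (gs : String × List String) : String × String := (gs.1, pvFmtV gs.2)

-- what B's pending dict holds for a gene whose star list (in A's gene_map) is o
def pvPend (o : Option (List String)) : Option String :=
  match o with
  | some [t] => some t
  | _ => none

theorem pv_get?_erase (d : PySem.Dict String String) (k x : String) :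
    (d.erase k).get? x = if x = k then none else d.get? x := by
  obtain ⟨l⟩ := d
  induction l with
  | nil => simp [PySem.Dict.erase, PySem.Dict.get?]
  | cons hd tl ih =>
    by_cases hk : hd.1 = k <;> by_cases hx : hd.1 = x <;>
      simp_all [PySem.Dict.erase, PySem.Dict.get?, List.filter_cons, List.find?_cons]

theorem pv_contains_of_items_map (r : PySem.Dict String String)
    (gm : PySem.Dict String (List String)) (h : r.items = gm.items.map pvFmtP) (x : String) :
    r.contains x = gm.contains x := by
  simp [PySem.Dict.contains, h, List.any_map, pvFmtP, Function.comp_def]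

theorem pv_inv_step (l : List (List (String × String))) :
    ∀ (gm : PySem.Dict String (List String)) (r p : PySem.Dict String String),
      gm.keys.Nodup →
      (∀ q ∈ gm.items, q.2 ≠ []) →
      r.items = gm.items.map pvFmtP →
      (∀ x, p.get? x = pvPend (gm.get? x)) →
      (l.foldl pvAltStep (r, p)).1.items = (l.foldl pvGroupStep gm).items.map pvFmtP := by
  induction l with
  | nil => intro gm r p _ _ hr _; simpa using hr
  | cons var rest ih =>
    intro gm r p hnd hne hr hp
    simp only [List.foldl_cons]
    set g := pvLookup var "gene" with hg
    set s := pvLookup var "star" with hs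
    have hrc : ∀ x, r.contains x = gm.contains x := pv_contains_of_items_map r gm hr
    by_cases hc : gm.contains g = true
    · -- gene already seen
      obtain ⟨stars, hst⟩ : ∃ stars, gm.get? g = some stars := by
        rw [PySem.Dict.contains_eq_isSome_get?] at hc
        exact Option.isSome_iff_exists.mp hc
      have hA : pvGroupStep gm var = gm.insert g (stars ++ [s]) := by
        simp [pvGroupStep, PySem.Dict.modify, PySem.Dict.getD, hst, ← hg, ← hs]
      have hrc' : r.contains g = true := (hrc g).trans hc
      rcases stars with _ | ⟨a, tl⟩
      · exact absurd rfl (hne (g, []) (PySem.Dict.mem_items_of_get?_eq_some gm hst))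
      rcases tl with _ | ⟨b, tl⟩
      · -- exactly one star so far: second variant completes the diplotype
        have hpt : p.get? g = some a := by rw [hp g, hst]; rfl
        have hpc2 : p.contains g = true := by
          rw [PySem.Dict.contains_eq_isSome_get?, hpt]; rfl
        have hpd : p.getD g "" = a := by simp [PySem.Dict.getD, hpt]
        have hB : pvAltStep (r, p) var = (r.insert g (a ++ "/" ++ s), p.erase g) := by
          simp [pvAltStep, ← hg, ← hs, hrc', hpc2, hpd]
        rw [hA, hB]
        apply ih
        · exact PySem.Dict.nodup_keys_insert _ _ _ hnd
        · intro q hq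
          rw [PySem.Dict.items_insert_of_contains gm _ hc] at hq
          obtain ⟨q', hq', hrep⟩ := List.mem_map.mp hq
          by_cases h1 : (q'.1 == g) = true <;> simp [h1] at hrep <;> subst hrep
          · simp
          · exact hne q' hq'
        · rw [PySem.Dict.items_insert_of_contains r _ hrc',
              PySem.Dict.items_insert_of_contains gm _ hc, hr, List.map_map, List.map_map]
          apply List.map_congr_left
          intro q _
          by_cases h1 : q.1 = g <;>
            simp [Function.comp, pvFmtP, h1, pvFmtV, PySem.List.pyGetD]
        · intro x
          rw [pv_get?_erase, PySem.Dict.get?_insert]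
          by_cases hx : x = g <;> simp [hx, hp x, pvPend]
      · -- two or more stars already: both sides leave the diplotype unchanged
        have hpg : p.get? g = none := by rw [hp g, hst]; rfl
        have hpc2 : p.contains g = false := by
          rw [PySem.Dict.contains_eq_isSome_get?, hpg]; rfl
        have hB : pvAltStep (r, p) var = (r, p) := by
          simp [pvAltStep, ← hg, hrc', hpc2]
        rw [hA, hB]
        apply ih
        · exact PySem.Dict.nodup_keys_insert _ _ _ hnd
        · intro q hq
          rw [PySem.Dict.items_insert_of_contains gm _ hc] at hq
          obtain ⟨q', hq', hrep⟩ := List.mem_map.mp hq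
          by_cases h1 : (q'.1 == g) = true <;> simp [h1] at hrep <;> subst hrep
          · simp
          · exact hne q' hq'
        · rw [PySem.Dict.items_insert_of_contains gm _ hc, hr, List.map_map]
          apply List.map_congr_left
          intro q hq
          by_cases h1 : q.1 = g
          · have hq2 : q.2 = a :: b :: tl := by
              have := PySem.Dict.get?_of_mem_items gm (k := q.1) (v := q.2)
                (by simpa using hq) hnd
              rw [h1, hst] at this
              exact (Option.some_inj.mp this).symm
            have h0 : (0:Int) ≤ (tl.length : Int) + 1 := by positivity
            have h0' : (0:Int) ≤ (tl.length : Int) + 1 + 1 := by positivity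
            simp [Function.comp, pvFmtP, h1, hq2, pvFmtV, PySem.List.pyGetD,
              PySem.List.pyGet?, PySem.List.pyIdx?, h0, h0']
          · simp [Function.comp, pvFmtP, h1]
        · intro x
          rw [PySem.Dict.get?_insert]
          by_cases hx : x = g <;> simp [hx, hp x, hpg, pvPend]
    · -- fresh gene
      have hc' : gm.contains g = false := by simpa using hc
      have hrc' : r.contains g = false := (hrc g).trans hc'
      have hA : pvGroupStep gm var = gm.insert g [s] := by
        simp [pvGroupStep, PySem.Dict.modify,
          PySem.Dict.getD_of_not_contains _ _ hc', ← hg, ← hs]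
      have hB : pvAltStep (r, p) var = (r.insert g (s ++ "/Unknown"), p.insert g s) := by
        simp [pvAltStep, ← hg, ← hs, hrc']
      rw [hA, hB]
      apply ih
      · exact PySem.Dict.nodup_keys_insert _ _ _ hnd
      · intro q hq
        rw [PySem.Dict.items_insert_of_not_contains gm _ hc'] at hq
        rcases List.mem_append.mp hq with h | h
        · exact hne q h
        · simp at h; subst h; simp
      · rw [PySem.Dict.items_insert_of_not_contains r _ hrc',
            PySem.Dict.items_insert_of_not_contains gm _ hc', hr]
        simp [pvFmtP, pvFmtV, PySem.List.pyGetD]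
      · intro x
        rw [PySem.Dict.get?_insert, PySem.Dict.get?_insert]
        by_cases hx : x = g <;> simp [hx, hp x, pvPend]

theorem pv_fmt_loop (gm : PySem.Dict String (List String)) (h : gm.keys.Nodup) :
    (gm.items.foldl pvFmtStep PySem.Dict.empty).items = gm.items.map pvFmtP := by
  have hfresh : ∀ a ∈ gm.items,
      (PySem.Dict.empty : PySem.Dict String String).contains a.1 = false := by
    intro a _; simp [PySem.Dict.contains, PySem.Dict.empty]
  have hnd : (gm.items.map Prod.fst).Nodup := h
  have hmain := PySem.Dict.items_foldl_insert_fresh gm.items Prod.fst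
    (fun gs => pvFmtV gs.2) PySem.Dict.empty hfresh hnd
  simpa [pvFmtStep, pvFmtV, pvFmtP, PySem.Dict.empty] using hmain

-- ===== VERDICT (by name: the statement is the Claim_ definition above) =====
theorem build_diplotypes_spec : Claim_equal_build_diplotypes := by
  intro variants _ _
  unfold Spec_build_diplotypes build_diplotypes build_diplotypes_alt
  rw [pv_fmt_loop _ ?nd]
  case nd =>
    exact PySem.Dict.nodup_keys_foldl_modify_key variants (fun var => pvLookup var "gene")
      [] (fun _ var => (fun stars => stars ++ [pvLookup var "star"])) _ PySem.Dict.nodup_keys_empty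
  exact (pv_inv_step variants PySem.Dict.empty PySem.Dict.empty PySem.Dict.empty
    PySem.Dict.nodup_keys_empty (by simp [PySem.Dict.empty]) (by simp [PySem.Dict.empty])
    (by intro x; simp [PySem.Dict.get?, PySem.Dict.empty, pvPend])).symm
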